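-- pv_equiv track=rewrite | github.com/pypi-data/pypi-mirror-98 | packages/datawelder/datawelder-0.8.0.tar.gz/datawelder-0.8.0/datawelder/join.py | _calculate_indices
-- ===== SOURCE A (Python) =====
-- from typing import (
--     Any,
--     Callable,
--     Dict,
--     Iterator,
--     List,
--     Optional,
--     Tuple,
--     TYPE_CHECKING,
--     Union,
-- )
--
-- Field = Tuple[int, int, str]
--
-- def _calculate_indices(
--     frame_headers: List[List[str]],
--     selected_fields: List[Field],
-- ) -> List[int]:
--     """Calculate the required indices into the joined record."""
--     joined_fields: List[Tuple[int, int]] = []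
--     for framenum, header in enumerate(frame_headers):
--         for fieldnum, fieldname in enumerate(header):
--             joined_fields.append((framenum, fieldnum))
--     indices = [
--         joined_fields.index((framenum, fieldnum))
--         for (framenum, fieldnum, unused_alias) in selected_fields
--     ]
--     return indices
-- ===== SOURCE B (Python) =====
-- from typing import List, Tuple
--
-- Field = Tuple[int, int, str]
--
--
-- def _calculate_indices(
--     frame_headers: List[List[str]],
--     selected_fields: List[Field],
-- ) -> List[int]:
--     """Calculate the required indices into the joined record.
--
--     offsets[k] is the number of fields in frames 0..k-1, so the flat index
--     of field (framenum, fieldnum) is offsets[framenum] + fieldnum.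
--     """
--     offsets: List[int] = []
--     total = 0
--     for header in frame_headers:
--         offsets.append(total)
--         total += len(header)
--     return [offsets[framenum] + fieldnum
--             for framenum, fieldnum, _alias in selected_fields]
-- ===== Notes on version B (the rewrite author's own statement) =====
-- stated objective: faster
-- what changed: Replaces the materialised flat list of (framenum, fieldnum) pairs and the linear .index() scan per selected field with a cumulative-length offset table, so each index is offsets[framenum] + fieldnum in O(1); Pre_ excludes selections whose (framenum, fieldnum) is not a valid position, on which A raises ValueError.
import Mathlib
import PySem

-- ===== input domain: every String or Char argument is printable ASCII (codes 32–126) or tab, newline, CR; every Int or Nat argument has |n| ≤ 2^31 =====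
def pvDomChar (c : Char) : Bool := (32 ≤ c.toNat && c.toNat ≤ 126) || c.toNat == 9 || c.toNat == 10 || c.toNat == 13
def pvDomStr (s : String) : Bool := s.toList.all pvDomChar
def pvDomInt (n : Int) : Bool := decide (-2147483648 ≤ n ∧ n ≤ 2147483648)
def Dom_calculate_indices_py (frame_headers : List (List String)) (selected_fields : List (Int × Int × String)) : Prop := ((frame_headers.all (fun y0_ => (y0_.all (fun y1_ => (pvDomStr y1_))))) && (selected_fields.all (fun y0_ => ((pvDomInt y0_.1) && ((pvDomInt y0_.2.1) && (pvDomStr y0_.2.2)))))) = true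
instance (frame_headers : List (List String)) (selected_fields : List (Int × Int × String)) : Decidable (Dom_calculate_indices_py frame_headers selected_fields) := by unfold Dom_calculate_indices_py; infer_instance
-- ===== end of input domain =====

-- B replaces A's flat (framenum, fieldnum) list and per-field linear .index() scan by a
-- cumulative-length offset table (offsets[framenum] + fieldnum per selected field): faster.

-- ===== PORT A =====
-- inner loop 'for fieldnum, fieldname in enumerate(header): joined_fields.append((framenum, fieldnum))'
def pvRowA (header : List String) (framenum fieldnum : Int) : List (Int × Int) :=
  match header with
  | [] => []
  | _ :: t => (framenum, fieldnum) :: pvRowA t framenum (fieldnum + 1)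

-- outer loop 'for framenum, header in enumerate(frame_headers): …'
def pvJoinedA (frame_headers : List (List String)) (framenum : Int) : List (Int × Int) :=
  match frame_headers with
  | [] => []
  | h :: t => pvRowA h framenum 0 ++ pvJoinedA t (framenum + 1)

def calculate_indices_py (frame_headers : List (List String)) (selected_fields : List (Int × Int × String)) : List Int :=
  let joined_fields := pvJoinedA frame_headers 0
  -- '.index' raises ValueError when absent; those inputs are outside Pre_ (getD 0 is never used there)
  selected_fields.map (fun s => ((PySem.List.index? joined_fields (s.1, s.2.1)).getD 0 : Int))

-- ===== PORT B =====
-- loop 'for header in frame_headers: offsets.append(total); total += len(header)'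
def pvOffsetsB (frame_headers : List (List String)) (total : Int) : List Int :=
  match frame_headers with
  | [] => []
  | h :: t => total :: pvOffsetsB t (total + h.length)

def calculate_indices_py_alt (frame_headers : List (List String)) (selected_fields : List (Int × Int × String)) : List Int :=
  let offsets := pvOffsetsB frame_headers 0
  -- 'offsets[framenum]' raises IndexError out of range; those inputs are outside Pre_ (getD 0 never used there)
  selected_fields.map (fun s => (PySem.List.pyGet? offsets s.1).getD 0 + s.2.1)

-- ===== PRECONDITION & SPEC =====
-- Pre_ excludes exactly the inputs on which A raises ValueError: a selected field whose
-- (framenum, fieldnum) is not an in-range position of the joined header.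
def Pre_calculate_indices_py (frame_headers : List (List String)) (selected_fields : List (Int × Int × String)) : Prop :=
  ∀ s ∈ selected_fields, 0 ≤ s.1 ∧ s.1 < (frame_headers.length : Int) ∧ 0 ≤ s.2.1 ∧
    s.2.1 < (((PySem.List.pyGet? frame_headers s.1).getD []).length : Int)
instance (frame_headers : List (List String)) (selected_fields : List (Int × Int × String)) : Decidable (Pre_calculate_indices_py frame_headers selected_fields) := by unfold Pre_calculate_indices_py; infer_instance

def pvWitness_calculate_indices_py : List (List String) × (List (Int × Int × String)) :=
  ([["a", "b"], ["c"]], [(1, 0, "x"), (0, 1, "y")])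

def Spec_calculate_indices_py (frame_headers : List (List String)) (selected_fields : List (Int × Int × String)) (out : List Int) : Prop := out = calculate_indices_py_alt frame_headers selected_fields
instance (frame_headers : List (List String)) (selected_fields : List (Int × Int × String)) (out : List Int) : Decidable (Spec_calculate_indices_py frame_headers selected_fields out) := by unfold Spec_calculate_indices_py; infer_instance

-- ===== CLAIM (what is proved, stated in full; the proofs are below) =====
def Claim_equal_calculate_indices_py : Prop := ∀ (frame_headers : List (List String)) (selected_fields : List (Int × Int × String)), Dom_calculate_indices_py frame_headers selected_fields → Pre_calculate_indices_py frame_headers selected_fields → Spec_calculate_indices_py frame_headers selected_fields (calculate_indices_py frame_headers selected_fields)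

-- ===== LEMMAS AND PROOFS =====

-- prefix sum of header lengths (Nat-valued)
def pvPref (frame_headers : List (List String)) (i : Nat) : Nat :=
  ((frame_headers.take i).map List.length).sum

lemma pvRowA_length (header : List String) (k j0 : Int) :
    (pvRowA header k j0).length = header.length := by
  induction header generalizing j0 with
  | nil => rfl
  | cons a t ih => simp [pvRowA, ih]

lemma pvRowA_index (header : List String) (rest : List (Int × Int)) (k j0 : Int) (j : Nat)
    (hj : j < header.length) :
    PySem.List.index? (pvRowA header k j0 ++ rest) (k, j0 + j) = some j := by
  induction header generalizing j0 j with
  | nil => simp at hj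
  | cons a t ih =>
    cases j with
    | zero =>
      have h0 : j0 + ((0 : Nat) : Int) = j0 := by push_cast; ring
      rw [h0, pvRowA, List.cons_append, PySem.List.index?_cons_self]
    | succ m =>
      have hne : (k, j0) ≠ (k, j0 + ((m + 1 : Nat) : Int)) := by
        intro h
        have := congrArg Prod.snd h
        simp at this
        omega
      rw [pvRowA, List.cons_append, PySem.List.index?_cons_of_ne _ hne]
      have harg : j0 + ((m + 1 : Nat) : Int) = (j0 + 1) + (m : Int) := by push_cast; ring
      rw [harg, ih (j0 + 1) m (by simpa using Nat.lt_of_succ_lt_succ hj)]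
      rfl

lemma not_mem_pvRowA (header : List String) (k j0 i j : Int) (hk : k ≠ i) :
    (i, j) ∉ pvRowA header k j0 := by
  induction header generalizing j0 with
  | nil => simp [pvRowA]
  | cons a t ih =>
    simp only [pvRowA, List.mem_cons, not_or]
    exact ⟨fun h => hk (by injection h with h1 _; exact h1.symm), ih (j0 + 1)⟩

lemma index?_append_of_not_mem {α : Type} [BEq α] [LawfulBEq α] (l t : List α) (v : α) (h : v ∉ l) :
    PySem.List.index? (l ++ t) v = (PySem.List.index? t v).map (· + l.length) := by
  induction l with
  | nil => simp
  | cons a l ih =>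
    have hne : a ≠ v := fun he => h (he ▸ List.mem_cons_self)
    rw [List.cons_append, PySem.List.index?_cons_of_ne _ hne,
      ih (fun hm => h (List.mem_cons_of_mem _ hm))]
    cases PySem.List.index? t v <;> simp <;> omega

lemma pvJoinedA_index (frame_headers : List (List String)) (k : Int) (i j : Nat)
    (hi : i < frame_headers.length)
    (hj : j < ((PySem.List.pyGet? frame_headers (i : Int)).getD []).length) :
    PySem.List.index? (pvJoinedA frame_headers k) (k + i, (j : Int)) =
      some (pvPref frame_headers i + j) := by
  induction frame_headers generalizing k i with
  | nil => simp at hi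
  | cons h t ih =>
    cases i with
    | zero =>
      have hj' : j < h.length := by
        simpa [PySem.List.pyGet?_zero_cons] using hj
      have := pvRowA_index h (pvJoinedA t (k + 1)) k 0 j hj'
      simpa [pvJoinedA, pvPref] using this
    | succ m =>
      have hnm : ((k + ((m + 1 : Nat) : Int)), (j : Int)) ∉ pvRowA h k 0 :=
        not_mem_pvRowA h k 0 _ _ (by push_cast; omega)
      rw [pvJoinedA, index?_append_of_not_mem _ _ _ hnm]
      have hget : PySem.List.pyGet? (h :: t) (((m + 1 : Nat)) : Int) =
          PySem.List.pyGet? t (m : Int) := by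
        have hc : (((m + 1 : Nat)) : Int) = (m : Int) + 1 := by push_cast; ring
        rw [hc]
        exact PySem.List.pyGet?_cons_succ h t m
      have hj2 : j < ((PySem.List.pyGet? t (m : Int)).getD []).length := by
        rw [← hget]; exact hj
      have hi2 : m < t.length := by simpa using Nat.lt_of_succ_lt_succ hi
      have hrec := ih (k + 1) m hi2 hj2
      have harg : (k + ((m + 1 : Nat) : Int), (j : Int)) = (k + 1 + (m : Int), (j : Int)) := by
        simp; push_cast; ring
      rw [harg, hrec]
      simp [pvPref, pvRowA_length]
      omega

lemma pvOffsetsB_get (frame_headers : List (List String)) (total : Int) (i : Nat)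
    (hi : i < frame_headers.length) :
    PySem.List.pyGet? (pvOffsetsB frame_headers total) (i : Int) =
      some (total + (pvPref frame_headers i : Int)) := by
  induction frame_headers generalizing total i with
  | nil => simp at hi
  | cons h t ih =>
    cases i with
    | zero => simp [pvOffsetsB, pvPref]
    | succ m =>
      have hc : (((m + 1 : Nat)) : Int) = (m : Int) + 1 := by push_cast; ring
      rw [pvOffsetsB, hc, PySem.List.pyGet?_cons_succ,
        ih (total + h.length) m (by simpa using Nat.lt_of_succ_lt_succ hi)]
      simp [pvPref]
      ring

-- ===== VERDICT (by name: the statement is the Claim_ definition above) =====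
theorem calculate_indices_py_spec : Claim_equal_calculate_indices_py := by
  intro fh sf _ hpre
  unfold Spec_calculate_indices_py calculate_indices_py calculate_indices_py_alt
  apply List.map_congr_left
  intro s hs
  obtain ⟨h1, h2, h3, h4⟩ := hpre s hs
  set i := s.1.toNat with hidef
  set j := s.2.1.toNat with hjdef
  have hs1 : s.1 = (i : Int) := (Int.toNat_of_nonneg h1).symm
  have hs2 : s.2.1 = (j : Int) := (Int.toNat_of_nonneg h3).symm
  have hi : i < fh.length := by omega
  have hj : j < ((PySem.List.pyGet? fh (i : Int)).getD []).length := by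
    rw [← hs1]; omega
  have hA := pvJoinedA_index fh 0 i j hi hj
  have hB := pvOffsetsB_get fh 0 i hi
  rw [hs1, hs2]
  have h0 : (0 : Int) + (i : Int) = (i : Int) := by ring
  rw [← h0, hA]
  simp [hB]
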